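-- pv_equiv track=rewrite | github.com/Aubinx/TIPE-2021-Error-Correcting-Code | Programmes/TIPE.py | nb_carres_orth
-- ===== SOURCE A (Python) =====
-- def fact_premiere(n):#Renvoie la liste des facteurs premiers de n pour n<200 avec leur multiplicité
--     PRE=[2,3,5,7,9,11,13,17,19,23,29,31,37,41,43,47,53,59,61,67,71,73,79,83,89,97,101,103,107,109,113,127,131,137,139,149,151,157,163,167,173,179,181,191,193,197,199]
--     P=[]
--     for i in PRE:
--         while n%i==0:
--             P.append(i)
--             n=n//i
--     m=len(P)
--     L=[[P[0],1]]
--     for j in range(1,m):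
--         if P[j]!=P[j-1]:
--             L.append([P[j],0])
--     c=0
--     for k in range(1,m):
--         if P[k]!=P[k-1]:
--             c+=1
--         L[c][1]+=1
--     return L
--
-- def nb_carres_orth(n):# min(pi**ei - 1)
--     P=fact_premiere(n)
--     m=P[0][0]**P[0][1] - 1
--     l=len(P)
--     for i in range(l):
--         if P[i][0]**P[i][1] - 1 < m:
--             m=P[i][0]**P[i][1] - 1
--     return m
-- ===== SOURCE B (Python) =====
-- def nb_carres_orth(n):  # min(p**e - 1) over the prime-power factorization of n (primes from the fixed table)
--     PRE = [2, 3, 5, 7, 9, 11, 13, 17, 19, 23, 29, 31, 37, 41, 43, 47, 53, 59, 61,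
--            67, 71, 73, 79, 83, 89, 97, 101, 103, 107, 109, 113, 127, 131, 137,
--            139, 149, 151, 157, 163, 167, 173, 179, 181, 191, 193, 197, 199]
--     best = None
--     for p in PRE:
--         e = 0
--         while n % p == 0:
--             n //= p
--             e += 1
--         if e > 0:
--             v = p ** e - 1
--             if best is None or v < best:
--                 best = v
--     return best
-- ===== Notes on version B (the rewrite author's own statement) =====
-- stated objective: simpler
-- what changed: B computes the minimum of p**e - 1 in the single factorization pass over the fixed prime table (one scalar exponent and a running minimum per prime), instead of A's pipeline that materializes the flat multiset of prime factors, then regroups it into [prime, multiplicity] pairs with two index loops over adjacent elements, then scans that list for the minimum.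
-- outside the precondition, e.g. on nb_carres_orth(1): A raises IndexError, B returns None
import Mathlib
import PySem

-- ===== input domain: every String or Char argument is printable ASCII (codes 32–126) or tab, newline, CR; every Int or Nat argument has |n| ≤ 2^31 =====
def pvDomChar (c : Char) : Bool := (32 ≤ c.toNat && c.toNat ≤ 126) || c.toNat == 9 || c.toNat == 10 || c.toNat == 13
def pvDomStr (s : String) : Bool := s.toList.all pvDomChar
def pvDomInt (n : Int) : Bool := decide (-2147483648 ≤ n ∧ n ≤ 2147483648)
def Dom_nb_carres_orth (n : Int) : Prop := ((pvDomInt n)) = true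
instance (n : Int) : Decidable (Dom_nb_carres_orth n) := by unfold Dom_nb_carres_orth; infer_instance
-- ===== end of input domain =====

-- B folds the running minimum of p^e - 1 into the single factorization pass over the fixed
-- prime table, instead of A's build-flat-factor-list / regroup-with-index-loops / scan-for-min pipeline.

-- ===== PORT A =====

-- the while-loops terminate because |n| strictly shrinks when a factor ≥ 2 is divided out
theorem pv_div_natAbs_lt (n i : Int) (hn : n ≠ 0) (hi : 2 ≤ i) (hd : PySem.Int.mod n i = 0) :
    (PySem.Int.floordiv n i).natAbs < n.natAbs := by
  have hdvd : i ∣ n := (PySem.Int.mod_eq_zero_iff_dvd n i).mp hd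
  obtain ⟨k, hk⟩ := hdvd
  have hipos : (0:Int) < i := by omega
  have h1 : PySem.Int.floordiv n i = n / i := PySem.Int.floordiv_eq_ediv_of_pos hipos
  have h2 : n / i = k := by rw [hk]; exact Int.mul_ediv_cancel_left k (by omega)
  have hk0 : k ≠ 0 := by rintro rfl; simp at hk; omega
  have : n.natAbs = i.natAbs * k.natAbs := by rw [hk, Int.natAbs_mul]
  have hi2 : 2 ≤ i.natAbs := by omega
  have hk1 : 1 ≤ k.natAbs := by omega
  rw [h1, h2]
  nlinarith [this]

def PRE_A : List Int := [2,3,5,7,9,11,13,17,19,23,29,31,37,41,43,47,53,59,61,67,71,73,79,83,89,97,101,103,107,109,113,127,131,137,139,149,151,157,163,167,173,179,181,191,193,197,199]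

-- 'while n%i==0: P.append(i); n=n//i' (the n ≠ 0 / 2 ≤ i conjuncts are totality guards only;
-- they hold whenever the Python loop runs under Pre_)
def pullA (i : Int) (P : List Int) (n : Int) : List Int × Int :=
  if h : PySem.Int.mod n i = 0 ∧ n ≠ 0 ∧ 2 ≤ i then
    pullA i (P ++ [i]) (PySem.Int.floordiv n i)
  else (P, n)
termination_by n.natAbs
decreasing_by exact pv_div_natAbs_lt n i h.2.1 h.2.2 h.1

-- 'L[c][1] += 1' on the inner 2-element list
def bumpA (l : List Int) : List Int := PySem.List.pySetD l 1 (PySem.List.pyGetD l 1 0 + 1)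
def incAtA (L : List (List Int)) (c : Int) : List (List Int) :=
  PySem.List.pySetD L c (bumpA (PySem.List.pyGetD L c []))

def fact_premiere (n : Int) : List (List Int) :=
  let PN := PRE_A.foldl (fun s i => pullA i s.1 s.2) ([], n)
  let P := PN.1
  let m : Int := (P.length : Int)
  let L0 : List (List Int) := [[PySem.List.pyGetD P 0 0, 1]]
  let L1 := (PySem.List.pyRange 1 m 1).foldl
      (fun L j => if PySem.List.pyGetD P j 0 ≠ PySem.List.pyGetD P (j-1) 0
                  then L ++ [[PySem.List.pyGetD P j 0, 0]] else L) L0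
  let CL := (PySem.List.pyRange 1 m 1).foldl
      (fun (s : Int × List (List Int)) k =>
        let c := if PySem.List.pyGetD P k 0 ≠ PySem.List.pyGetD P (k-1) 0 then s.1 + 1 else s.1
        (c, incAtA s.2 c)) ((0 : Int), L1)
  CL.2

-- 'p ** e' for the nonnegative exponents this program produces (multiplicities)
def pwA (p e : Int) : Int := p ^ e.toNat

def nb_carres_orth (n : Int) : Int :=
  let P := fact_premiere n
  let m0 := pwA (PySem.List.pyGetD (PySem.List.pyGetD P 0 []) 0 0)
                (PySem.List.pyGetD (PySem.List.pyGetD P 0 []) 1 0) - 1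
  let l : Int := (P.length : Int)
  (PySem.List.pyRange 0 l 1).foldl
    (fun m i =>
      if pwA (PySem.List.pyGetD (PySem.List.pyGetD P i []) 0 0)
             (PySem.List.pyGetD (PySem.List.pyGetD P i []) 1 0) - 1 < m
      then pwA (PySem.List.pyGetD (PySem.List.pyGetD P i []) 0 0)
               (PySem.List.pyGetD (PySem.List.pyGetD P i []) 1 0) - 1
      else m) m0

-- ===== PORT B =====

def PRE_B : List Int := [2,3,5,7,9,11,13,17,19,23,29,31,37,41,43,47,53,59,61,67,71,73,79,83,89,97,101,103,107,109,113,127,131,137,139,149,151,157,163,167,173,179,181,191,193,197,199]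

-- 'while n%p==0: n//=p; e+=1' (same totality guards as in port A)
def pullB (p : Int) (e : Int) (n : Int) : Int × Int :=
  if h : PySem.Int.mod n p = 0 ∧ n ≠ 0 ∧ 2 ≤ p then
    pullB p (e + 1) (PySem.Int.floordiv n p)
  else (e, n)
termination_by n.natAbs
decreasing_by exact pv_div_natAbs_lt n p h.2.1 h.2.2 h.1

def nb_carres_orth_alt (n : Int) : Int :=
  let s := PRE_B.foldl
    (fun (s : Option Int × Int) p =>
      let en := pullB p 0 s.2
      if 0 < en.1 then
        -- 'v = p**e - 1' (e ≥ 0 by construction, so toNat is exact);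
        -- 'if best is None or v < best: best = v'
        (match s.1 with
         | none => some (p ^ en.1.toNat - 1)
         | some b => if p ^ en.1.toNat - 1 < b then some (p ^ en.1.toNat - 1) else some b,
         en.2)
      else (s.1, en.2)) ((none : Option Int), n)
  s.1.getD 0  -- Source B returns None only when no table prime divides n; such n are outside Pre_

-- ===== PRECONDITION & SPEC =====
-- Pre_ excludes exactly the inputs on which the Python A does not return normally: n = 0
-- (the first while-loop never terminates) and n with no factor in the fixed prime table
-- (P stays empty and 'P[0]' raises IndexError, e.g. n = 1, n = -1 or any prime > 199).
def Pre_nb_carres_orth (n : Int) : Prop :=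
  n ≠ 0 ∧ ∃ p ∈ ([2,3,5,7,9,11,13,17,19,23,29,31,37,41,43,47,53,59,61,67,71,73,79,83,89,97,101,103,107,109,113,127,131,137,139,149,151,157,163,167,173,179,181,191,193,197,199] : List Int), p ∣ n
instance (n : Int) : Decidable (Pre_nb_carres_orth n) := by unfold Pre_nb_carres_orth; infer_instance

def pvWitness_nb_carres_orth : Int := 12

def Spec_nb_carres_orth (n : Int) (out : Int) : Prop := out = nb_carres_orth_alt n
instance (n : Int) (out : Int) : Decidable (Spec_nb_carres_orth n out) := by unfold Spec_nb_carres_orth; infer_instance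

-- ===== CLAIM (what is proved, stated in full; the proofs are below) =====
def Claim_equal_nb_carres_orth : Prop := ∀ (n : Int), Dom_nb_carres_orth n → Pre_nb_carres_orth n → Spec_nb_carres_orth n (nb_carres_orth n)

-- ===== LEMMAS AND PROOFS =====

-- ===== proof-side helpers =====

-- the per-prime blocks [(p, multiplicity)] and residual that both ports compute along the table
def spB (ps : List Int) (n : Int) : List (Int × Int) × Int :=
  match ps with
  | [] => ([], n)
  | p :: t =>
    let en := pullB p 0 n
    let r := spB t en.2
    (if 0 < en.1 then (p, en.1) :: r.1 else r.1, r.2)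

def flatB (bs : List (Int × Int)) : List Int := bs.flatMap (fun b => List.replicate b.2.toNat b.1)

-- B's running minimum over the blocks
def bminB (b : Option Int) (bs : List (Int × Int)) : Option Int :=
  match bs with
  | [] => b
  | e :: t => bminB (match b with
      | none => some (e.1 ^ e.2.toNat - 1)
      | some x => if e.1 ^ e.2.toNat - 1 < x then some (e.1 ^ e.2.toNat - 1) else some x) t

-- adjacent pairs (P[j-1], P[j]) of prev :: t
def adjP (x : Int) (t : List Int) : List (Int × Int) := (x :: t).zip t

theorem adjP_cons (x y : Int) (t : List Int) : adjP x (y :: t) = (x, y) :: adjP y t := rfl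

theorem pullB_shift (p : Int) : ∀ (M : Nat) (n : Int), n.natAbs = M →
    ∀ e : Int, pullB p e n = (e + (pullB p 0 n).1, (pullB p 0 n).2) := by
  intro M
  induction M using Nat.strong_induction_on with
  | _ M ih =>
    intro n hM e
    by_cases h : PySem.Int.mod n p = 0 ∧ n ≠ 0 ∧ 2 ≤ p
    · have hlt := pv_div_natAbs_lt n p h.2.1 h.2.2 h.1
      have hA : pullB p e n = pullB p (e+1) (PySem.Int.floordiv n p) := by
        rw [pullB]; rw [dif_pos h]
      have hB : pullB p 0 n = pullB p (0+1) (PySem.Int.floordiv n p) := by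
        rw [pullB]; rw [dif_pos h]
      rw [hA, hB, ih _ (by omega) _ rfl (e+1), ih _ (by omega) _ rfl (0+1)]
      simp [Prod.ext_iff]; ring
    · have hA : pullB p e n = (e, n) := by rw [pullB]; rw [dif_neg h]
      have hB : pullB p 0 n = (0, n) := by rw [pullB]; rw [dif_neg h]
      rw [hA, hB]; simp

theorem pullB_nonneg (p n : Int) : 0 ≤ (pullB p 0 n).1 := by
  by_cases h : PySem.Int.mod n p = 0 ∧ n ≠ 0 ∧ 2 ≤ p
  · have hB : pullB p 0 n = pullB p (0+1) (PySem.Int.floordiv n p) := by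
      rw [pullB]; rw [dif_pos h]
    rw [hB, pullB_shift p _ _ rfl]
    have := pullB_nonneg p (PySem.Int.floordiv n p)
    · simp; omega
  · have hB : pullB p 0 n = (0, n) := by rw [pullB]; rw [dif_neg h]
    rw [hB]
termination_by n.natAbs
decreasing_by exact pv_div_natAbs_lt n p h.2.1 h.2.2 h.1

theorem pullA_eq (i : Int) : ∀ (M : Nat) (n : Int), n.natAbs = M → ∀ P : List Int,
    pullA i P n = (P ++ List.replicate (pullB i 0 n).1.toNat i, (pullB i 0 n).2) := by
  intro M
  induction M using Nat.strong_induction_on with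
  | _ M ih =>
    intro n hM P
    by_cases h : PySem.Int.mod n i = 0 ∧ n ≠ 0 ∧ 2 ≤ i
    · have hlt := pv_div_natAbs_lt n i h.2.1 h.2.2 h.1
      have hA : pullA i P n = pullA i (P ++ [i]) (PySem.Int.floordiv n i) := by
        rw [pullA]; rw [dif_pos h]
      have hB : pullB i 0 n = pullB i (0+1) (PySem.Int.floordiv n i) := by
        rw [pullB]; rw [dif_pos h]
      have hnn := pullB_nonneg i (PySem.Int.floordiv n i)
      have hB2 := pullB_shift i _ (PySem.Int.floordiv n i) rfl (0+1)
      rw [hA, ih _ (by omega) _ rfl, hB, hB2]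
      have ht : ((0:Int) + 1 + (pullB i 0 (PySem.Int.floordiv n i)).1).toNat
          = (pullB i 0 (PySem.Int.floordiv n i)).1.toNat + 1 := by omega
      rw [ht]
      simp [List.replicate_succ, List.append_assoc]
    · have hA : pullA i P n = (P, n) := by rw [pullA]; rw [dif_neg h]
      have hB : pullB i 0 n = (0, n) := by rw [pullB]; rw [dif_neg h]
      rw [hA, hB]; simp

theorem pullB_e0 (p n : Int) (h0 : ¬ 0 < (pullB p 0 n).1) : (pullB p 0 n).2 = n := by
  by_cases h : PySem.Int.mod n p = 0 ∧ n ≠ 0 ∧ 2 ≤ p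
  · exfalso
    have hB : pullB p 0 n = pullB p (0+1) (PySem.Int.floordiv n p) := by
      rw [pullB]; rw [dif_pos h]
    rw [hB, pullB_shift p _ _ rfl] at h0
    have := pullB_nonneg p (PySem.Int.floordiv n p)
    simp at h0; omega
  · have hB : pullB p 0 n = (0, n) := by rw [pullB]; rw [dif_neg h]
    rw [hB]

theorem pullB_pos (p n : Int) (hn : n ≠ 0) (hp : 2 ≤ p) (hd : p ∣ n) : 0 < (pullB p 0 n).1 := by
  have h : PySem.Int.mod n p = 0 ∧ n ≠ 0 ∧ 2 ≤ p :=
    ⟨(PySem.Int.mod_eq_zero_iff_dvd n p).mpr hd, hn, hp⟩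
  have hB : pullB p 0 n = pullB p (0+1) (PySem.Int.floordiv n p) := by
    rw [pullB]; rw [dif_pos h]
  rw [hB, pullB_shift p _ _ rfl]
  have := pullB_nonneg p (PySem.Int.floordiv n p)
  simp; omega

-- spB facts
theorem spB_pos : ∀ (ps : List Int) (n : Int), ∀ b ∈ (spB ps n).1, 0 < b.2 := by
  intro ps
  induction ps with
  | nil => intro n b hb; simp [spB] at hb
  | cons p t ih =>
    intro n b hb
    simp only [spB] at hb
    by_cases h : 0 < (pullB p 0 n).1
    · rw [if_pos h] at hb
      rcases List.mem_cons.mp hb with h1 | h2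
      · subst h1; exact h
      · exact ih _ _ h2
    · rw [if_neg h] at hb; exact ih _ _ hb

theorem spB_sublist : ∀ (ps : List Int) (n : Int), ((spB ps n).1.map Prod.fst).Sublist ps := by
  intro ps
  induction ps with
  | nil => intro n; simp [spB]
  | cons p t ih =>
    intro n
    simp only [spB]
    by_cases h : 0 < (pullB p 0 n).1
    · rw [if_pos h]; exact List.Sublist.cons₂ p (ih _)
    · rw [if_neg h]; exact List.Sublist.cons p (ih _)

theorem spB_ne_nil : ∀ (ps : List Int) (n p : Int), n ≠ 0 → 2 ≤ p → p ∈ ps → p ∣ n →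
    (spB ps n).1 ≠ [] := by
  intro ps
  induction ps with
  | nil => intro n p _ _ hmem; simp at hmem
  | cons q t ih =>
    intro n p hn hp hmem hd
    simp only [spB]
    by_cases h : 0 < (pullB q 0 n).1
    · rw [if_pos h]; simp
    · rw [if_neg h]
      have hres := pullB_e0 q n h
      rcases List.mem_cons.mp hmem with h1 | h2
      · subst h1; exact absurd (pullB_pos p n hn hp hd) h
      · rw [hres]; exact ih n p hn hp h2 hd

-- A's factor loop produces the flattened blocks
theorem foldA_eq : ∀ (ps : List Int) (n : Int) (P0 : List Int),
    ps.foldl (fun s i => pullA i s.1 s.2) (P0, n)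
      = (P0 ++ flatB (spB ps n).1, (spB ps n).2) := by
  intro ps
  induction ps with
  | nil => intro n P0; simp [spB, flatB]
  | cons p t ih =>
    intro n P0
    simp only [List.foldl_cons]
    rw [pullA_eq p _ n rfl P0, ih]
    simp only [spB]
    by_cases h : 0 < (pullB p 0 n).1
    · rw [if_pos h]
      simp [flatB, List.append_assoc]
    · rw [if_neg h]
      have h0 : (pullB p 0 n).1.toNat = 0 := by
        have := pullB_nonneg p n; omega
      simp [h0, flatB]

-- B's single pass produces the running minimum over the blocks
theorem foldB_eq : ∀ (ps : List Int) (n : Int) (b0 : Option Int),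
    ps.foldl (fun (s : Option Int × Int) p =>
      let en := pullB p 0 s.2
      if 0 < en.1 then
        (match s.1 with
         | none => some (p ^ en.1.toNat - 1)
         | some b => if p ^ en.1.toNat - 1 < b then some (p ^ en.1.toNat - 1) else some b,
         en.2)
      else (s.1, en.2)) (b0, n)
    = (bminB b0 (spB ps n).1, (spB ps n).2) := by
  intro ps
  induction ps with
  | nil => intro n b0; simp [spB, bminB]
  | cons p t ih =>
    intro n b0
    simp only [List.foldl_cons, spB]
    by_cases h : 0 < (pullB p 0 n).1
    · rw [if_pos h, if_pos h, ih]
      rfl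
    · rw [if_neg h, if_neg h, ih]

theorem bminB_some : ∀ (t : List (Int × Int)) (x : Int),
    bminB (some x) t
      = some (t.foldl (fun x e => if e.1 ^ e.2.toNat - 1 < x then e.1 ^ e.2.toNat - 1 else x) x) := by
  intro t
  induction t with
  | nil => intro x; simp [bminB]
  | cons e t ih =>
    intro x
    simp only [bminB, List.foldl_cons]
    rw [← apply_ite some, ih]

theorem set_len_append {α : Type} : ∀ (done : List α) (x : α) (todo : List α) (v : α),
    (done ++ x :: todo).set done.length v = done ++ v :: todo := by
  intro done
  induction done with
  | nil => intro x todo v; simp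
  | cons d ds ih => intro x todo v; simp [ih]

theorem getD_len_append {α : Type} : ∀ (done : List α) (x : α) (todo : List α) (d : α),
    (done ++ x :: todo).getD done.length d = x := by
  intro done
  induction done with
  | nil => intro x todo d; simp
  | cons e ds ih => intro x todo d; simp

theorem incAtA_append (done : List (List Int)) (xx : List Int) (todo : List (List Int)) :
    incAtA (done ++ xx :: todo) ((done.length : Nat) : Int) = done ++ bumpA xx :: todo := by
  unfold incAtA
  rw [PySem.List.pyGetD_natCast, PySem.List.pySetD_natCast, getD_len_append, set_len_append]

theorem bumpA_pair (a b : Int) : bumpA [a, b] = [a, b + 1] := rfl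

-- index loops over adjacent elements P[j], P[j-1] are folds over the adjacent-pair list
theorem foldl_pyRange_adj {α : Type} (f : α → Int → Int → α) :
    ∀ (t : List Int) (x : Int) (init : α),
    (PySem.List.pyRange 1 (((x :: t).length : Nat) : Int) 1).foldl
       (fun acc j => f acc (PySem.List.pyGetD (x :: t) j 0) (PySem.List.pyGetD (x :: t) (j-1) 0)) init
    = (adjP x t).foldl (fun acc pr => f acc pr.2 pr.1) init := by
  intro t
  induction t with
  | nil =>
    intro x init
    rw [show (((x :: ([]:List Int)).length : Nat) : Int) = 1 by simp]
    rw [PySem.List.pyRange_one_eq_nil (by omega)]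
    simp [adjP]
  | cons y t ih =>
    intro x init
    have hlen : (((x :: y :: t).length : Nat) : Int) = (t.length : Int) + 2 := by
      push_cast [List.length_cons]; ring
    rw [hlen, PySem.List.pyRange_one_cons (by omega)]
    simp only [List.foldl_cons]
    have h1 : PySem.List.pyGetD (x :: y :: t) (1 : Int) 0 = y := by
      rw [show (1:Int) = ((1:Nat):Int) from rfl, PySem.List.pyGetD_natCast]; simp
    have h0 : PySem.List.pyGetD (x :: y :: t) (1 - 1 : Int) 0 = x := by
      norm_num
    rw [h1, h0, adjP_cons]
    simp only [List.foldl_cons]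
    have ihy := ih y (f init y x)
    have hRy : PySem.List.pyRange 1 (((y :: t).length : Nat) : Int) 1
        = (List.range t.length).map (fun k : Nat => 1 + (k : Int)) := by
      rw [PySem.List.pyRange_one,
          show ((((y :: t).length : Nat) : Int) - 1).toNat = t.length by
            push_cast [List.length_cons]; omega]
    have hR2 : PySem.List.pyRange (1 + 1) ((t.length : Int) + 2) 1
        = (List.range t.length).map (fun k : Nat => 1 + 1 + (k : Int)) := by
      rw [PySem.List.pyRange_one,
          show (((t.length : Int) + 2) - (1 + 1)).toNat = t.length by omega]
    rw [hRy, List.foldl_map] at ihy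
    rw [hR2, List.foldl_map]
    rw [← ihy]
    apply PySem.List.foldl_congr_mem
    intro acc k _
    have e1 : (1 + 1 + (k:Int)) = ((k + 2 : Nat) : Int) := by push_cast; ring
    have e2 : (1 + 1 + (k:Int) - 1) = ((k + 1 : Nat) : Int) := by push_cast; ring
    have e3 : (1 + (k:Int)) = ((k + 1 : Nat) : Int) := by push_cast; ring
    have e4 : (1 + (k:Int) - 1) = ((k : Nat) : Int) := by push_cast; ring
    rw [e2, e4, e1, e3, PySem.List.pyGetD_natCast, PySem.List.pyGetD_natCast,
        PySem.List.pyGetD_natCast, PySem.List.pyGetD_natCast]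
    simp

theorem flatB_cons (b : Int × Int) (bs : List (Int × Int)) :
    flatB (b :: bs) = List.replicate b.2.toNat b.1 ++ flatB bs := by simp [flatB]

theorem adjP_map_snd (f : Int → List Int) : ∀ (t : List Int) (x : Int),
    (adjP x t).map (fun pr => f pr.2) = t.map f := by
  intro t
  induction t with
  | nil => intro x; rfl
  | cons y t ih => intro x; rw [adjP_cons]; simp only [List.map_cons, ih]

theorem adj_filter : ∀ (bs : List (Int × Int)) (r : Nat) (prev : Int),
    (∀ b ∈ bs, 0 < b.2) → List.IsChain (fun a b => a ≠ b) (prev :: bs.map Prod.fst) →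
    (adjP prev (List.replicate r prev ++ flatB bs)).filter (fun pr => decide (pr.2 ≠ pr.1))
      = adjP prev (bs.map Prod.fst) := by
  intro bs
  induction bs with
  | nil =>
    intro r prev hpos hch
    induction r with
    | zero => simp [flatB, adjP]
    | succ r ihr =>
      simp only [flatB, List.flatMap_nil, List.append_nil, List.replicate_succ] at ihr ⊢
      rw [adjP_cons]
      simp only [List.filter_cons]
      rw [if_neg (by simp)]
      exact ihr
  | cons hb tb ih =>
    intro r prev hpos hch
    induction r with
    | zero =>
      obtain ⟨m, hm⟩ : ∃ m, hb.2.toNat = m + 1 :=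
        ⟨hb.2.toNat - 1, by have := hpos hb (by simp); omega⟩
      rw [flatB_cons, hm, List.replicate_succ]
      simp only [List.replicate_zero, List.nil_append, List.cons_append, adjP_cons]
      have hcc : prev ≠ hb.1 ∧ List.IsChain (fun a b => a ≠ b) (hb.1 :: List.map Prod.fst tb) := by
        simpa using hch
      have hne : prev ≠ hb.1 := hcc.1
      simp only [List.filter_cons]
      rw [if_pos (by simpa using (Ne.symm hne))]
      have htl := ih m hb.1 (fun b hb' => hpos b (by simp [hb'])) hcc.2
      rw [List.map_cons, adjP_cons]
      exact congrArg _ htl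
    | succ r ihr =>
      rw [List.replicate_succ, List.cons_append, adjP_cons]
      simp only [List.filter_cons]
      rw [if_neg (by simp)]
      exact ihr

theorem cloop : ∀ (bs : List (Int × Int)) (r : Nat) (prev k : Int) (done : List (List Int)),
    (∀ b ∈ bs, 0 < b.2) → List.IsChain (fun a b => a ≠ b) (prev :: bs.map Prod.fst) →
    (adjP prev (List.replicate r prev ++ flatB bs)).foldl
      (fun (s : Int × List (List Int)) pr =>
        ((if pr.2 ≠ pr.1 then s.1 + 1 else s.1),
         incAtA s.2 (if pr.2 ≠ pr.1 then s.1 + 1 else s.1)))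
      (((done.length : Nat) : Int), done ++ [prev, k] :: bs.map (fun b => [b.1, (0:Int)]))
    = (((done.length + bs.length : Nat) : Int),
       done ++ [prev, k + (r : Int)] :: bs.map (fun b => [b.1, b.2])) := by
  intro bs
  induction bs with
  | nil =>
    intro r prev k done hpos hch
    induction r generalizing k with
    | zero => simp [flatB, adjP]
    | succ r ihr =>
      simp only [flatB, List.flatMap_nil, List.append_nil, List.replicate_succ] at ihr ⊢
      rw [adjP_cons, List.foldl_cons]
      rw [if_neg (by simp)]
      dsimp only
      rw [List.map_nil] at ihr ⊢
      rw [incAtA_append done [prev, k] [], bumpA_pair]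
      rw [ihr (k+1)]
      have hk : k + 1 + (r : Int) = k + ((r+1 : Nat) : Int) := by push_cast; ring
      rw [hk]
  | cons hb tb ih =>
    intro r prev k done hpos hch
    induction r generalizing k with
    | zero =>
      obtain ⟨m, hm⟩ : ∃ m, hb.2.toNat = m + 1 :=
        ⟨hb.2.toNat - 1, by have := hpos hb (by simp); omega⟩
      have hb2 : hb.2 = (m : Int) + 1 := by
        have h1 := hpos hb (by simp)
        omega
      rw [flatB_cons, hm, List.replicate_succ]
      simp only [List.replicate_zero, List.nil_append, List.cons_append, adjP_cons,
                 List.foldl_cons, List.map_cons]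
      have hcc : prev ≠ hb.1 ∧ List.IsChain (fun a b => a ≠ b) (hb.1 :: List.map Prod.fst tb) := by
        simpa using hch
      have hne : prev ≠ hb.1 := hcc.1
      rw [if_pos (by simpa using (Ne.symm hne))]
      rw [List.append_cons done [prev, k]]
      have hidx : ((done.length : Nat) : Int) + 1 = (((done ++ [[prev, k]]).length : Nat) : Int) := by
        simp
      rw [hidx, incAtA_append (done ++ [[prev, k]]) [hb.1, 0], bumpA_pair]
      rw [ih m hb.1 ((0:Int)+1) (done ++ [[prev, k]])
            (fun b hb' => hpos b (by simp [hb'])) hcc.2]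
      have hv : (0 : Int) + 1 + (m : Int) = hb.2 := by omega
      rw [hv, ← List.append_cons]
      have hlen : (((done ++ [[prev, k]]).length + tb.length : Nat) : Int)
          = ((done.length + (hb :: tb).length : Nat) : Int) := by
        simp [List.length_append]; omega
      rw [hlen]
      norm_num
    | succ r ihr =>
      rw [List.replicate_succ, List.cons_append, adjP_cons, List.foldl_cons]
      rw [if_neg (by simp)]
      dsimp only
      rw [incAtA_append done [prev, k], bumpA_pair]
      rw [ihr (k+1)]
      have hk : k + 1 + (r : Int) = k + ((r+1 : Nat) : Int) := by push_cast; ring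
      rw [hk]

-- instantiations of foldl_pyRange_adj at the two concrete loop bodies of fact_premiere
theorem jloop_adj (t : List Int) (x : Int) (init : List (List Int)) :
    (PySem.List.pyRange 1 (((x :: t).length : Nat) : Int) 1).foldl
      (fun L j => if PySem.List.pyGetD (x :: t) j 0 ≠ PySem.List.pyGetD (x :: t) (j - 1) 0
                  then L ++ [[PySem.List.pyGetD (x :: t) j 0, 0]] else L) init
    = (adjP x t).foldl (fun L pr => if pr.2 ≠ pr.1 then L ++ [[pr.2, 0]] else L) init :=
  foldl_pyRange_adj (fun L b a => if b ≠ a then L ++ [[b, 0]] else L) t x init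

theorem cloop_adj (t : List Int) (x : Int) (init : Int × List (List Int)) :
    (PySem.List.pyRange 1 (((x :: t).length : Nat) : Int) 1).foldl
      (fun (s : Int × List (List Int)) k =>
        ((if PySem.List.pyGetD (x :: t) k 0 ≠ PySem.List.pyGetD (x :: t) (k - 1) 0
           then s.1 + 1 else s.1),
         incAtA s.2 (if PySem.List.pyGetD (x :: t) k 0 ≠ PySem.List.pyGetD (x :: t) (k - 1) 0
           then s.1 + 1 else s.1))) init
    = (adjP x t).foldl
        (fun (s : Int × List (List Int)) pr =>
          ((if pr.2 ≠ pr.1 then s.1 + 1 else s.1),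
           incAtA s.2 (if pr.2 ≠ pr.1 then s.1 + 1 else s.1))) init :=
  foldl_pyRange_adj
    (fun (s : Int × List (List Int)) b a =>
      ((if b ≠ a then s.1 + 1 else s.1), incAtA s.2 (if b ≠ a then s.1 + 1 else s.1))) t x init

theorem fact_eq (n : Int) (hb : Int × Int) (tb : List (Int × Int)) (m : Nat)
    (hsp : (spB PRE_A n).1 = hb :: tb) (hm : hb.2.toNat = m + 1) (hb2 : hb.2 = (m : Int) + 1)
    (hpos : ∀ b ∈ tb, 0 < b.2)
    (hch : List.IsChain (fun a b => a ≠ b) (hb.1 :: tb.map Prod.fst)) :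
    fact_premiere n = (hb :: tb).map (fun b => [b.1, b.2]) := by
  simp only [fact_premiere]
  rw [foldA_eq PRE_A n []]
  have hP : (([] ++ flatB (spB PRE_A n).1, (spB PRE_A n).2) : List Int × Int).1
      = hb.1 :: (List.replicate m hb.1 ++ flatB tb) := by
    dsimp only
    rw [hsp, flatB_cons, hm, List.replicate_succ]
    simp
  rw [hP]
  simp only [PySem.List.pyGetD_zero_cons]
  rw [jloop_adj]
  rw [cloop_adj (List.replicate m hb.1 ++ flatB tb) hb.1]
  rw [PySem.List.foldl_append_ite (p := fun pr : Int × Int => pr.2 ≠ pr.1)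
        (f := fun pr : Int × Int => [pr.2, (0:Int)])]
  rw [adj_filter tb m hb.1 hpos hch, adjP_map_snd (fun q => [q, 0])]
  have hc := cloop tb m hb.1 1 [] hpos hch
  simp only [List.length_nil, Nat.cast_zero, List.nil_append] at hc
  rw [show ([[hb.1, 1]] : List (List Int)) ++ (tb.map Prod.fst).map (fun q => [q, (0:Int)])
        = [hb.1, 1] :: tb.map (fun b => [b.1, (0:Int)]) from by
      simp [List.map_map, Function.comp]]
  rw [hc]
  rw [show (1 : Int) + (m : Int) = hb.2 by omega]
  simp

theorem pair_get1 (a b : Int) : PySem.List.pyGetD [a, b] 1 0 = b := rfl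

theorem minloop_adj (L : List (List Int)) (init : Int) :
    (PySem.List.pyRange 0 ((L.length : Nat) : Int) 1).foldl
      (fun m i =>
        if pwA (PySem.List.pyGetD (PySem.List.pyGetD L i []) 0 0)
               (PySem.List.pyGetD (PySem.List.pyGetD L i []) 1 0) - 1 < m
        then pwA (PySem.List.pyGetD (PySem.List.pyGetD L i []) 0 0)
                 (PySem.List.pyGetD (PySem.List.pyGetD L i []) 1 0) - 1
        else m) init
    = L.foldl (fun m pi =>
        if pwA (PySem.List.pyGetD pi 0 0) (PySem.List.pyGetD pi 1 0) - 1 < m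
        then pwA (PySem.List.pyGetD pi 0 0) (PySem.List.pyGetD pi 1 0) - 1 else m) init :=
  PySem.List.foldl_pyRange_zero_pyGetD' L []
    (fun m pi =>
      if pwA (PySem.List.pyGetD pi 0 0) (PySem.List.pyGetD pi 1 0) - 1 < m
      then pwA (PySem.List.pyGetD pi 0 0) (PySem.List.pyGetD pi 1 0) - 1 else m) init

theorem main_eq (n : Int) (hpre : Pre_nb_carres_orth n) :
    nb_carres_orth n = nb_carres_orth_alt n := by
  obtain ⟨hn, p, hpmem, hpdvd⟩ := hpre
  have hpm : p ∈ PRE_A := by unfold PRE_A; exact hpmem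
  have hp2 : (2:Int) ≤ p := by
    have hall : ∀ q ∈ PRE_A, (2:Int) ≤ q := by decide
    exact hall p hpm
  have hne := spB_ne_nil PRE_A n p hn hp2 hpm hpdvd
  obtain ⟨hb, tb, hsp⟩ := List.exists_cons_of_ne_nil hne
  have hposall := spB_pos PRE_A n
  have hbpos : 0 < hb.2 := by apply hposall; rw [hsp]; simp
  have hpos : ∀ b ∈ tb, 0 < b.2 := fun b hbm => hposall b (by rw [hsp]; simp [hbm])
  have hnd : ((spB PRE_A n).1.map Prod.fst).Nodup :=
    (by decide : PRE_A.Nodup).sublist (spB_sublist PRE_A n)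
  have hch : List.IsChain (fun a b => a ≠ b) (hb.1 :: tb.map Prod.fst) := by
    rw [hsp] at hnd
    simp only [List.map_cons] at hnd
    exact hnd.isChain
  obtain ⟨m, hm⟩ : ∃ m, hb.2.toNat = m + 1 := ⟨hb.2.toNat - 1, by omega⟩
  have hb2 : hb.2 = (m : Int) + 1 := by omega
  have hfact := fact_eq n hb tb m hsp hm hb2 hpos hch
  simp only [nb_carres_orth, nb_carres_orth_alt]
  rw [hfact]
  rw [minloop_adj]
  rw [show PRE_B = PRE_A from rfl]
  rw [foldB_eq PRE_A n none, hsp]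
  simp only [List.map_cons, PySem.List.pyGetD_zero_cons]
  rw [show bminB none (hb :: tb) = bminB (some (hb.1 ^ hb.2.toNat - 1)) tb from rfl]
  rw [bminB_some]
  simp only [List.foldl_cons, List.foldl_map, Option.getD_some]
  simp [pwA, pair_get1]

-- ===== VERDICT (by name: the statement is the Claim_ definition above) =====
theorem nb_carres_orth_spec : Claim_equal_nb_carres_orth := by
  intro n _ hpre
  unfold Spec_nb_carres_orth
  exact main_eq n hpre
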